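-- pv_equiv track=rewrite | github.com/fangyinjie/DAG_Generator | DAG_Generator/DAG.py | DAG_combine_init_group
-- ===== SOURCE A (Python) =====
-- def DAG_combine_init_group(DAG_list_disp_sub):
--     inter_dag_node_group = [0 for x in range(0, len(DAG_list_disp_sub))]
--     inter_dag_node_group_sub = []
--     inter_node_test = 0
--     for x in range(0, len(DAG_list_disp_sub)):
--         for y in range(0, DAG_list_disp_sub[x]):
--             #inter_dag_node_group_sub.append([(x + 1),  inter_node_test + y + 1])  # 所属层号_节点号
--             inter_dag_node_group_sub.append(inter_node_test + y)  # 节点号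
--         inter_node_test += DAG_list_disp_sub[x]
--         inter_dag_node_group[x] = inter_dag_node_group_sub
--         inter_dag_node_group_sub = []
--     return inter_dag_node_group
-- ===== SOURCE B (Python) =====
-- def DAG_combine_init_group(DAG_list_disp_sub):
--     # two-phase: prefix-sum offset table, then slice the global index range per layer
--     offsets = [0]
--     for size in DAG_list_disp_sub:
--         offsets.append(offsets[-1] + size)
--     return [list(range(offsets[i], offsets[i + 1]))
--             for i in range(len(DAG_list_disp_sub))]
-- ===== Notes on version B (the rewrite author's own statement) =====
-- stated objective: alternative
-- what changed: A interleaves a running counter with per-layer inner append loops; B first builds a prefix-sum offset table in one pass and then emits each group as list(range(offsets[i], offsets[i+1])) in a second pass.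
import Mathlib
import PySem

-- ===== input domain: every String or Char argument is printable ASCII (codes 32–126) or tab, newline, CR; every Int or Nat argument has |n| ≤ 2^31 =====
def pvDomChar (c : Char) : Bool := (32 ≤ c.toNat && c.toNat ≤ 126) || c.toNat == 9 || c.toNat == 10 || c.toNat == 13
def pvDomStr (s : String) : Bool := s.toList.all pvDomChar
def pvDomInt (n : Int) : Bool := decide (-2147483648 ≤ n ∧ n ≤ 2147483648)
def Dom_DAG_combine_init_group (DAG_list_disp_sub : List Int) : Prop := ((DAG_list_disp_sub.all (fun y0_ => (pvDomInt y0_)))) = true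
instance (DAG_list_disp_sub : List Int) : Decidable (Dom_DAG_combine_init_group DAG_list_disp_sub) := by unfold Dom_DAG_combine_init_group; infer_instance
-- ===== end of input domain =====

-- B replaces A's fused running-counter loop by a prefix-sum offset table plus a
-- range-slicing pass (different decomposition, same O(n + total) cost).

-- ===== PORT A =====
-- state = (inter_dag_node_group so far, inter_node_test); inner 'for y' loop is the map over range(0, size)
def DAG_combine_init_group (DAG_list_disp_sub : List Int) : List (List Int) :=
  (DAG_list_disp_sub.foldl
    (fun (st : List (List Int) × Int) s =>
      (st.1 ++ [(PySem.List.pyRange 0 s 1).map (fun y => st.2 + y)], st.2 + s))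
    ([], 0)).1

-- ===== PORT B =====
-- the offsets-building loop of Source B: offsets.append(offsets[-1] + size)
def pvBuildOffsets : List Int → List Int → List Int
  | acc, [] => acc
  | acc, s :: rest => pvBuildOffsets (acc ++ [PySem.List.pyGetD acc (-1) 0 + s]) rest

def DAG_combine_init_group_alt (DAG_list_disp_sub : List Int) : List (List Int) :=
  let offsets := pvBuildOffsets [0] DAG_list_disp_sub
  (List.range DAG_list_disp_sub.length).map
    (fun (i : Nat) => PySem.List.pyRange (PySem.List.pyGetD offsets ((i : Int)) 0)
                                 (PySem.List.pyGetD offsets (((i + 1 : Nat) : Int)) 0) 1)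

-- ===== PRECONDITION & SPEC =====
def Spec_DAG_combine_init_group (DAG_list_disp_sub : List Int) (out : List (List Int)) : Prop := out = DAG_combine_init_group_alt DAG_list_disp_sub
instance (DAG_list_disp_sub : List Int) (out : List (List Int)) : Decidable (Spec_DAG_combine_init_group DAG_list_disp_sub out) := by unfold Spec_DAG_combine_init_group; infer_instance

-- ===== CLAIM (what is proved, stated in full; the proofs are below) =====
def Claim_equal_DAG_combine_init_group : Prop := ∀ (DAG_list_disp_sub : List Int), Dom_DAG_combine_init_group DAG_list_disp_sub → Spec_DAG_combine_init_group DAG_list_disp_sub (DAG_combine_init_group DAG_list_disp_sub)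

-- ===== LEMMAS AND PROOFS =====

-- pure recursive form of A's loop
def pvGoA (t : Int) : List Int → List (List Int)
  | [] => []
  | s :: rest => ((PySem.List.pyRange 0 s 1).map (fun y => t + y)) :: pvGoA (t + s) rest

theorem pvFoldA (l : List Int) : ∀ (g : List (List Int)) (t : Int),
    (l.foldl
      (fun (st : List (List Int) × Int) s =>
        (st.1 ++ [(PySem.List.pyRange 0 s 1).map (fun y => st.2 + y)], st.2 + s))
      (g, t)).1 = g ++ pvGoA t l := by
  induction l with
  | nil => simp [pvGoA]
  | cons s rest ih =>
    intro g t
    simp only [List.foldl_cons, pvGoA]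
    rw [ih]
    simp

-- pure prefix-sum list: pvPre t l = [t, t+l₀, t+l₀+l₁, …]
def pvPre (t : Int) : List Int → List Int
  | [] => [t]
  | s :: rest => t :: pvPre (t + s) rest

theorem pvBuild_eq (l : List Int) : ∀ (acc : List Int) (t : Int),
    pvBuildOffsets (acc ++ [t]) l = acc ++ pvPre t l := by
  induction l with
  | nil => intro acc t; simp [pvBuildOffsets, pvPre]
  | cons s rest ih =>
    intro acc t
    simp only [pvBuildOffsets, pvPre]
    rw [PySem.List.pyGetD_neg_one_append_singleton]
    rw [ih (acc ++ [t]) (t + s)]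
    simp

theorem pvPre_getD_zero (t : Int) (l : List Int) (d : Int) : (pvPre t l).getD 0 d = t := by
  cases l <;> simp [pvPre]

-- range shift: range(t, t+s) = [t + y for y in range(0, s)]
theorem pvRange_shift (t s : Int) :
    PySem.List.pyRange t (t + s) 1 = (PySem.List.pyRange 0 s 1).map (fun y => t + y) := by
  simp [PySem.List.pyRange_one, List.map_map, Function.comp_def]

theorem pvGoA_eq (l : List Int) : ∀ (t : Int),
    pvGoA t l = (List.range l.length).map
      (fun i => PySem.List.pyRange ((pvPre t l).getD i 0) ((pvPre t l).getD (i + 1) 0) 1) := by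
  induction l with
  | nil => intro t; simp [pvGoA]
  | cons s rest ih =>
    intro t
    simp only [pvGoA, List.length_cons, List.range_succ_eq_map, List.map_cons, List.map_map]
    congr 1
    · simp only [pvPre, List.getD_cons_zero, List.getD_cons_succ, pvPre_getD_zero]
      exact (pvRange_shift t s).symm
    · rw [ih (t + s)]
      apply List.map_congr_left
      intro i _
      simp [pvPre]

-- ===== VERDICT (by name: the statement is the Claim_ definition above) =====
theorem DAG_combine_init_group_spec : Claim_equal_DAG_combine_init_group := by
  intro l _
  unfold Spec_DAG_combine_init_group DAG_combine_init_group DAG_combine_init_group_alt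
  rw [pvFoldA l [] 0, List.nil_append, ← List.nil_append ([0] : List Int), pvBuild_eq l [] 0,
    List.nil_append, pvGoA_eq l 0]
  simp
  intro a _
  have h : ((a : Int) + 1) = (((a + 1 : Nat)) : Int) := by push_cast; ring
  rw [h, PySem.List.pyGetD_natCast]
  simp
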